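-- pv_equiv track=rewrite | github.com/AIlhomov/aoc25 | day2/2.py | part2
-- ===== SOURCE A (Python) =====
-- def part2(i):
--     s = str(i)
--     l = len(s)
--
--     for d in range(1, l // 2 + 1):
--         if l % d != 0:
--             continue #must divide length exactly
--
--         rep = l // d
--         if rep < 2:
--             continue #must repeat atleast twice
--
--         chunk = s[:d]
--         if chunk * rep == s:
--             return True
--     return False
-- ===== SOURCE B (Python) =====
-- def part2(i):
--     s = str(i)
--     return s in (s + s)[1:-1]
-- ===== Notes on version B (the rewrite author's own statement) =====
-- stated objective: idiomatic
-- what changed: Replaces the divisor loop with chunk comparisons by the string-rotation trick: s is a repetition of a shorter chunk exactly when s occurs in (s+s)[1:-1], a single substring test.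
import Mathlib
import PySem

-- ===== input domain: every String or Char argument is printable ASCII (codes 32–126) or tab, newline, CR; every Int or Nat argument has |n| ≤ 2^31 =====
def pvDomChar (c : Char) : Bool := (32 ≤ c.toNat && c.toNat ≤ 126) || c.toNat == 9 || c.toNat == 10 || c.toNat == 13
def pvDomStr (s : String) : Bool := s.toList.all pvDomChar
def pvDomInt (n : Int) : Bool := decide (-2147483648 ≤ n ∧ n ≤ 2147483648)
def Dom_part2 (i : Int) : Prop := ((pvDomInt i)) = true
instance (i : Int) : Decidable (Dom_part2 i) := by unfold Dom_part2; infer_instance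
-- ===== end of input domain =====

-- B replaces A's divisor loop over chunk comparisons by the string-rotation trick:
-- str(i) is a repetition of a shorter chunk iff it occurs in (str(i)+str(i))[1:-1].

-- ===== PORT A =====
def part2 (i : Int) : Bool :=
  let s : List Char := PySem.Int.toChars i
  let l : Int := (s.length : Int)
  (PySem.List.pyRange 1 (PySem.Int.floordiv l 2 + 1)).any (fun d =>
    if PySem.Int.mod l d ≠ 0 then false          -- must divide length exactly
    else
      let rep := PySem.Int.floordiv l d
      if rep < 2 then false                      -- must repeat at least twice
      else
        let chunk := PySem.List.slice s none (some d)
        decide (PySem.List.pyRepeat chunk rep = s))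

-- ===== PORT B =====
def part2_alt (i : Int) : Bool :=
  let s : List Char := PySem.Int.toChars i
  PySem.Chars.isIn s (PySem.List.slice (s ++ s) (some 1) (some (-1)))

-- ===== PRECONDITION & SPEC =====
def Spec_part2 (i : Int) (out : Bool) : Prop := out = part2_alt i
instance (i : Int) (out : Bool) : Decidable (Spec_part2 i out) := by unfold Spec_part2; infer_instance

-- ===== CLAIM (what is proved, stated in full; the proofs are below) =====
def Claim_equal_part2 : Prop := ∀ (i : Int), Dom_part2 i → Spec_part2 i (part2 i)

-- ===== LEMMAS AND PROOFS =====


theorem pv_rep_rotate (l : List Char) (d : Nat) (hd : 0 < d) (hdn : d ≤ l.length)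
    (hr : 2 ≤ l.length / d)
    (h : (List.replicate (l.length / d) (l.take d)).flatten = l) :
    l.drop d ++ l.take d = l := by
  set c := l.take d with hc
  have hcl : c.length = d := by simp [hc]; omega
  set r := l.length / d with hrr
  have hrep : List.replicate r c = c :: List.replicate (r - 1) c := by
    rw [← List.replicate_succ]
    congr 1
    omega
  rw [hrep] at h
  simp only [List.flatten_cons] at h
  have hdrop : l.drop d = (List.replicate (r - 1) c).flatten := by
    rw [← h, List.drop_left' hcl]
  have hflat : (List.replicate (r - 1) c).flatten ++ c = (List.replicate r c).flatten := by
    have : List.replicate (r - 1) c ++ [c] = List.replicate r c := by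
      rw [← List.replicate_succ']
      congr 1
      omega
    rw [← this, List.flatten_append]
    simp
  rw [hdrop, hflat, hrep]
  simpa using h

theorem pv_rotate_rep : ∀ (n : Nat) (l : List Char) (d : Nat), l.length = n → 0 < d →
    d ∣ l.length → l.drop d ++ l.take d = l →
    (List.replicate (l.length / d) (l.take d)).flatten = l := by
  intro n
  induction n using Nat.strong_induction_on with
  | _ n ih =>
    intro l d hn hd hdvd h
    by_cases hlt : l.length < d
    · have h0 : l.length = 0 := Nat.eq_zero_of_dvd_of_lt hdvd hlt
      have : l = [] := List.eq_nil_of_length_eq_zero h0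
      subst this
      simp
    · push_neg at hlt
      set c := l.take d with hc
      have hcl : c.length = d := by simp [hc]; omega
      obtain ⟨m, hm⟩ := hdvd
      have hdivn : l.length / d = m := by rw [hm, Nat.mul_div_cancel_left _ hd]
      by_cases heq : l.length = d
      · have hm1 : m = 1 := by
          have : d * m = d * 1 := by omega
          exact Nat.eq_of_mul_eq_mul_left hd this
        rw [hdivn, hm1]
        have hcll : c = l := by rw [hc]; exact List.take_of_length_le heq.le
        simp [hcll]
      · have hdn : d < l.length := by omega
        have hm2 : 2 ≤ m := by
          by_contra h2
          push_neg at h2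
          interval_cases m <;> omega
        have hmul : d * m - d = d * (m - 1) := by rw [Nat.mul_sub, Nat.mul_one]
        set r := l.drop d with hrd
        have hrl : r.length = l.length - d := by simp [hrd]
        have hdr : d ≤ r.length := by
          rw [hrl, hm]
          have : d * 2 ≤ d * m := Nat.mul_le_mul_left d hm2
          omega
        have hcr : c ++ r = l := List.take_append_drop d l
        have hrc : r ++ c = l := h
        have hrtake : r.take d = c := by
          have h1 : (r ++ c).take d = r.take d := by
            rw [List.take_append, show d - r.length = 0 by omega]
            simp
          have h2 : (c ++ r).take d = c := by
            rw [List.take_append, List.take_of_length_le hcl.le,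
                show d - c.length = 0 by omega]
            simp
          rw [hrc] at h1; rw [hcr] at h2; rw [← h1, h2]
        have hrdrop : r.drop d ++ r.take d = r := by
          have h1 : (r ++ c).drop d = r.drop d ++ c := List.drop_append_of_le_length hdr
          have h2 : (c ++ r).drop d = r := by rw [← hcl, List.drop_left]
          rw [hrc] at h1; rw [hcr] at h2
          rw [hrtake]
          exact h1.symm.trans h2
        have hrdvd : d ∣ r.length := by rw [hrl, hm, hmul]; exact ⟨m - 1, rfl⟩
        have hih := ih r.length (by omega) r d rfl hd hrdvd hrdrop
        rw [hrtake] at hih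
        have hrdiv : r.length / d = m - 1 := by
          rw [hrl, hm, hmul, Nat.mul_div_cancel_left _ hd]
        rw [hrdiv] at hih
        calc (List.replicate (l.length / d) (l.take d)).flatten
            = (List.replicate (m - 1 + 1) c).flatten := by
              rw [hdivn, ← hc, show m - 1 + 1 = m by omega]
          _ = c ++ (List.replicate (m - 1) c).flatten := by rw [List.replicate_succ]; simp
          _ = c ++ r := by rw [hih]
          _ = l := hcr

theorem pv_rotate_mul (l : List Char) (d m : Nat) (h : l.rotate d = l) :
    l.rotate (m * d) = l := by
  induction m with
  | zero => simp
  | succ m ih =>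
      calc l.rotate ((m + 1) * d) = (l.rotate (m * d)).rotate d := by
            rw [List.rotate_rotate]; ring_nf
        _ = l := by rw [ih, h]

theorem pv_min_period (l : List Char) (k : Nat) (hk0 : 0 < k) (hkn : k < l.length)
    (h : l.rotate k = l) :
    ∃ d, 0 < d ∧ d ≤ k ∧ d ∣ l.length ∧ l.rotate d = l := by
  have hex : ∃ m, 0 < m ∧ l.rotate m = l := ⟨k, hk0, h⟩
  obtain ⟨hd0, hrot⟩ := Nat.find_spec hex
  refine ⟨Nat.find hex, hd0, Nat.find_min' hex ⟨hk0, h⟩, ?_, hrot⟩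
  set d := Nat.find hex with hdd
  have hmd : l.rotate (l.length % d) = l := by
    calc l.rotate (l.length % d)
        = (l.rotate (l.length / d * d)).rotate (l.length % d) := by
          rw [pv_rotate_mul l d _ hrot]
      _ = l.rotate (l.length / d * d + l.length % d) := List.rotate_rotate l _ _
      _ = l.rotate l.length := by rw [Nat.div_add_mod']
      _ = l := List.rotate_length l
  by_cases hz : l.length % d = 0
  · exact Nat.dvd_of_mod_eq_zero hz
  · exfalso
    have hlt : l.length % d < d := Nat.mod_lt _ hd0
    exact Nat.find_min hex hlt ⟨Nat.pos_of_ne_zero hz, hmd⟩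

theorem pv_slice_one_negone {α : Type} (xs : List α) :
    PySem.List.slice xs (some 1) (some (-1)) = (xs.drop 1).take (xs.length - 2) := by
  simp [PySem.List.slice, PySem.List.clampIdx]
  rcases xs with _ | ⟨a, t⟩ <;> simp

theorem pv_prefix_drop_iff (l : List Char) (k : Nat) (hk : k ≤ l.length) :
    l <+: (l ++ l).drop k ↔ l.rotate k = l := by
  rw [List.drop_append_of_le_length hk, List.rotate_eq_drop_append_take hk,
      List.prefix_iff_eq_take, List.take_append,
      List.take_of_length_le (by simp), List.length_drop,
      Nat.sub_sub_self hk, eq_comm]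

theorem pv_B_iff (l : List Char) (hl : l ≠ []) :
    PySem.Chars.isIn l (PySem.List.slice (l ++ l) (some 1) (some (-1))) = true ↔
      ∃ k, 0 < k ∧ k < l.length ∧ l.rotate k = l := by
  have hn : 0 < l.length := List.length_pos_iff.mpr hl
  rw [PySem.Chars.isIn_iff_infix, pv_slice_one_negone,
      show (l ++ l).length - 2 = 2 * l.length - 2 by simp; omega]
  have hdlen : ((l ++ l).drop 1).length = 2 * l.length - 1 := by simp; omega
  constructor
  · rintro ⟨pre, suf, ht⟩
    have hlens : pre.length + l.length + suf.length = 2 * l.length - 2 := by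
      have h1 := congrArg List.length ht
      rw [List.length_take, hdlen] at h1
      simp at h1; omega
    refine ⟨pre.length + 1, by omega, by omega, ?_⟩
    rw [← pv_prefix_drop_iff l _ (by omega)]
    have hdr : (l ++ l).drop (pre.length + 1) = ((l ++ l).drop 1).drop pre.length := by
      rw [List.drop_drop]; ring_nf
    rw [hdr, ← List.take_append_drop (2 * l.length - 2) ((l ++ l).drop 1), ← ht]
    refine ⟨suf ++ (((l ++ l).drop 1).drop (2 * l.length - 2)), ?_⟩
    rw [List.append_assoc, List.append_assoc, List.drop_left' rfl]
  · rintro ⟨k, hk0, hkn, hrot⟩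
    obtain ⟨rest, hrest⟩ := (pv_prefix_drop_iff l k (by omega)).mpr hrot
    have hrlen : rest.length = l.length - k := by
      have := congrArg List.length hrest
      simp at this; omega
    have hsplit : (l ++ l).drop 1 = ((l ++ l).drop 1).take (k - 1) ++ (l ++ rest) := by
      conv_lhs => rw [← List.take_append_drop (k - 1) ((l ++ l).drop 1)]
      rw [List.drop_drop, hrest]
      congr 2
      omega
    have hplen : (((l ++ l).drop 1).take (k - 1)).length = k - 1 := by
      rw [List.length_take, hdlen]; omega
    refine ⟨((l ++ l).drop 1).take (k - 1), rest.take (l.length - 1 - k), ?_⟩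
    have hrhs : ((l ++ l).drop 1).take (2 * l.length - 2)
        = ((l ++ l).drop 1).take (k - 1) ++ (l ++ rest.take (l.length - 1 - k)) := by
      calc ((l ++ l).drop 1).take (2 * l.length - 2)
          = (((l ++ l).drop 1).take (k - 1) ++ (l ++ rest)).take (2 * l.length - 2) := by
            rw [← hsplit]
        _ = ((l ++ l).drop 1).take (k - 1) ++ (l ++ rest).take (2 * l.length - 2 - (k - 1)) := by
            rw [List.take_append, hplen, List.take_of_length_le (by rw [hplen]; omega)]
        _ = ((l ++ l).drop 1).take (k - 1) ++ (l ++ rest.take (l.length - 1 - k)) := by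
            rw [List.take_append,
                show 2 * l.length - 2 - (k - 1) - l.length = l.length - 1 - k by omega]
            congr 2
            exact List.take_of_length_le (by omega)
    rw [hrhs, List.append_assoc]


theorem pv_A_iff (s : List Char) :
    ((PySem.List.pyRange 1 (PySem.Int.floordiv (s.length : Int) 2 + 1)).any (fun d =>
      if PySem.Int.mod (s.length : Int) d ≠ 0 then false
      else
        let rep := PySem.Int.floordiv (s.length : Int) d
        if rep < 2 then false
        else
          let chunk := PySem.List.slice s none (some d)
          decide (PySem.List.pyRepeat chunk rep = s))) = true ↔
      ∃ d : Nat, 0 < d ∧ d ≤ s.length / 2 ∧ d ∣ s.length ∧ 2 ≤ s.length / d ∧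
        (List.replicate (s.length / d) (s.take d)).flatten = s := by
  have hfd : PySem.Int.floordiv ((s.length : Nat) : Int) 2 = ((s.length / 2 : Nat) : Int) := by
    exact_mod_cast PySem.Int.floordiv_natCast s.length 2
  rw [List.any_eq_true]
  constructor
  · rintro ⟨d, hd, hp⟩
    rw [PySem.List.mem_pyRange_one, hfd] at hd
    lift d to Nat using (by omega) with dn
    simp at hp
    obtain ⟨h1, h2, h3⟩ := hp
    have hdvd : dn ∣ s.length := by exact_mod_cast h1
    have h2' : 2 ≤ s.length / dn := by
      have : (1 : Int) < ((s.length / dn : Nat) : Int) := by rw [Int.natCast_div]; exact h2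
      omega
    have h3' : (List.replicate (s.length / dn) (s.take dn)).flatten = s := by
      rw [← Int.natCast_div, PySem.List.pyRepeat, Int.toNat_natCast] at h3
      exact h3
    exact ⟨dn, by omega, by omega, hdvd, h2', h3'⟩
  · rintro ⟨dn, hd0, hdh, hdvd, h2, hrep⟩
    refine ⟨(dn : Int), ?_, ?_⟩
    · rw [PySem.List.mem_pyRange_one, hfd]
      have h1 : (1 : Int) ≤ (dn : Int) := by exact_mod_cast hd0
      have h2 : (dn : Int) ≤ ((s.length / 2 : Nat) : Int) := by exact_mod_cast hdh
      exact ⟨h1, by omega⟩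
    · simp
      refine ⟨by exact_mod_cast hdvd, ?_, ?_⟩
      · have : (1 : Int) < ((s.length / dn : Nat) : Int) := by exact_mod_cast h2
        rw [Int.natCast_div] at this
        exact this
      · rw [← Int.natCast_div, PySem.List.pyRepeat, Int.toNat_natCast]
        exact hrep

theorem pv_main (l : List Char) (hl : l ≠ []) :
    (∃ d : Nat, 0 < d ∧ d ≤ l.length / 2 ∧ d ∣ l.length ∧ 2 ≤ l.length / d ∧
        (List.replicate (l.length / d) (l.take d)).flatten = l) ↔
      ∃ k, 0 < k ∧ k < l.length ∧ l.rotate k = l := by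
  have hn : 0 < l.length := List.length_pos_iff.mpr hl
  constructor
  · rintro ⟨d, hd0, hdh, hdvd, h2, hrep⟩
    have hdn : d ≤ l.length := le_trans hdh (Nat.div_le_self _ _)
    refine ⟨d, hd0, lt_of_le_of_lt hdh (Nat.div_lt_self hn (by omega)), ?_⟩
    rw [List.rotate_eq_drop_append_take hdn]
    exact pv_rep_rotate l d hd0 hdn h2 hrep
  · rintro ⟨k, hk0, hkn, hrot⟩
    obtain ⟨d, hd0, hdk, hdvd, hrotd⟩ := pv_min_period l k hk0 hkn hrot
    have hdn : d < l.length := lt_of_le_of_lt hdk hkn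
    obtain ⟨m, hm⟩ := hdvd
    have hm2 : 2 ≤ m := by
      by_contra hcon
      push_neg at hcon
      interval_cases m <;> omega
    have hdiv : l.length / d = m := by rw [hm, Nat.mul_div_cancel_left _ hd0]
    refine ⟨d, hd0, ?_, ⟨m, hm⟩, by omega, ?_⟩
    · have : d * 2 ≤ d * m := Nat.mul_le_mul_left d hm2
      omega
    · refine pv_rotate_rep l.length l d rfl hd0 ⟨m, hm⟩ ?_
      rw [← List.rotate_eq_drop_append_take (by omega)]
      exact hrotd

theorem pv_toChars_ne_nil (i : Int) : PySem.Int.toChars i ≠ [] := by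
  unfold PySem.Int.toChars
  split
  · simp
  · have h : 0 < (Nat.toDigits 10 i.toNat).length := Nat.length_toDigits_pos
    intro he; rw [he] at h; simp at h

-- ===== VERDICT (by name: the statement is the Claim_ definition above) =====
theorem part2_spec : Claim_equal_part2 := by
  intro i _
  unfold Spec_part2 part2 part2_alt
  rw [Bool.eq_iff_iff, pv_A_iff, pv_B_iff _ (pv_toChars_ne_nil i)]
  exact pv_main _ (pv_toChars_ne_nil i)
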